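-- pv_equiv track=rewrite | github.com/ValerieNayak/CodingChallenges | HackerRank/InterviewPrepKit/Arrays/array2d_ds.py | hourglassSum
-- ===== SOURCE A (Python) =====
-- def hourglassSum(arr):
--     max = None     # var to store max hourglass sum
--     for r in range(1, len(arr)-1):
--         for c in range(1, len(arr[r])-1):
--             sum = 0
--             coords = [(r-1, c-1), (r-1, c), (r-1, c+1), (r, c), (r+1, c-1), (r+1, c), (r+1, c+1)]
--             for point in coords:    # each point is a tuple
--                 sum += arr[point[0]][point[1]]
--             if max == None or sum > max:
--                 max = sum
--     return max
-- ===== SOURCE B (Python) =====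
-- def hourglassSum(arr):
--     # Precompute, per row, the sums of three consecutive cells around each interior column.
--     row3 = [[row[c - 1] + row[c] + row[c + 1] for c in range(1, len(row) - 1)]
--             for row in arr]
--     best = None
--     for r in range(1, len(arr) - 1):
--         for c in range(1, len(arr[r]) - 1):
--             s = row3[r - 1][c - 1] + arr[r][c] + row3[r + 1][c - 1]
--             if best == None or s > best:
--                 best = s
--     return best
-- ===== Notes on version B (the rewrite author's own statement) =====
-- stated objective: faster
-- what changed: B precomputes per-row sums of three consecutive cells (row3) once via list comprehensions, then forms each hourglass as row3[r-1][c-1] + arr[r][c] + row3[r+1][c-1], replacing A's 7-cell coordinate-tuple loop per hourglass (constant-factor: 3 adds and no tuple list per cell instead of a 7-iteration inner loop).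
import Mathlib
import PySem

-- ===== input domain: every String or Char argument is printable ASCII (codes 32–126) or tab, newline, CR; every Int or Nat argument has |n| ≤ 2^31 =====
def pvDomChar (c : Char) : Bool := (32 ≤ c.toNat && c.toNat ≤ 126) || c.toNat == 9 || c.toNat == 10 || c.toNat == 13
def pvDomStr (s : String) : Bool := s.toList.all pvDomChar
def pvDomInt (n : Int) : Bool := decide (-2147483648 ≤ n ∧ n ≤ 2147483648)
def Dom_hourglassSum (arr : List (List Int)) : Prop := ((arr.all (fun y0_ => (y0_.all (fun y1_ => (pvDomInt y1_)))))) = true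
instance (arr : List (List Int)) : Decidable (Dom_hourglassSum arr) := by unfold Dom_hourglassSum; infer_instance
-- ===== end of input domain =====

-- B replaces A's per-hourglass 7-cell coordinate scan by a precomputed table of
-- per-row 3-cell sums; same None-sentinel and strict '>' (first-wins) maximum.

-- ===== PORT A =====
def hourglassSum (arr : List (List Int)) : Option Int :=
  (PySem.List.pyRange 1 ((arr.length : Int) - 1) 1).foldl (fun mx r =>
    (PySem.List.pyRange 1 (((PySem.List.pyGetD arr r []).length : Int) - 1) 1).foldl (fun mx c =>
      let coords : List (Int × Int) :=
        [(r-1, c-1), (r-1, c), (r-1, c+1), (r, c), (r+1, c-1), (r+1, c), (r+1, c+1)]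
      let s := coords.foldl (fun s p =>
        s + PySem.List.pyGetD (PySem.List.pyGetD arr p.1 []) p.2 0) 0
      match mx with
      | none => some s
      | some m => if s > m then some s else some m) mx) none

-- ===== PORT B =====
-- per-row sums of three consecutive cells around each interior column
def pvRow3 (row : List Int) : List Int :=
  (PySem.List.pyRange 1 ((row.length : Int) - 1) 1).map (fun c =>
    PySem.List.pyGetD row (c-1) 0 + PySem.List.pyGetD row c 0 + PySem.List.pyGetD row (c+1) 0)

def hourglassSum_alt (arr : List (List Int)) : Option Int :=
  let t := arr.map pvRow3
  (PySem.List.pyRange 1 ((arr.length : Int) - 1) 1).foldl (fun best r =>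
    (PySem.List.pyRange 1 (((PySem.List.pyGetD arr r []).length : Int) - 1) 1).foldl (fun best c =>
      let s := PySem.List.pyGetD (PySem.List.pyGetD t (r-1) []) (c-1) 0
             + PySem.List.pyGetD (PySem.List.pyGetD arr r []) c 0
             + PySem.List.pyGetD (PySem.List.pyGetD t (r+1) []) (c-1) 0
      match best with
      | none => some s
      | some m => if s > m then some s else some m) best) none

-- ===== PRECONDITION & SPEC =====
-- Pre_ excludes exactly the ragged grids on which A raises IndexError: some interior
-- cell (r,c) whose neighbouring rows r-1 or r+1 are shorter than c+2.
def Pre_hourglassSum (arr : List (List Int)) : Prop :=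
  ∀ r ∈ PySem.List.pyRange 1 ((arr.length : Int) - 1) 1,
    ∀ c ∈ PySem.List.pyRange 1 (((PySem.List.pyGetD arr r []).length : Int) - 1) 1,
      c + 1 < ((PySem.List.pyGetD arr (r-1) []).length : Int) ∧
      c + 1 < ((PySem.List.pyGetD arr (r+1) []).length : Int)
instance (arr : List (List Int)) : Decidable (Pre_hourglassSum arr) := by
  unfold Pre_hourglassSum; infer_instance

def pvWitness_hourglassSum : List (List Int) :=
  [[1, 1, 1], [0, 1, 0], [2, 1, 1]]

def Spec_hourglassSum (arr : List (List Int)) (out : Option Int) : Prop := out = hourglassSum_alt arr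
instance (arr : List (List Int)) (out : Option Int) : Decidable (Spec_hourglassSum arr out) := by unfold Spec_hourglassSum; infer_instance

-- ===== CLAIM (what is proved, stated in full; the proofs are below) =====
def Claim_equal_hourglassSum : Prop := ∀ (arr : List (List Int)), Dom_hourglassSum arr → Pre_hourglassSum arr → Spec_hourglassSum arr (hourglassSum arr)

-- ===== LEMMAS AND PROOFS =====

theorem pvRow3_get (row : List Int) (c : Int) (h1 : 1 ≤ c) (h2 : c + 1 < (row.length : Int)) :
    PySem.List.pyGetD (pvRow3 row) (c-1) 0 =
      PySem.List.pyGetD row (c-1) 0 + PySem.List.pyGetD row c 0 + PySem.List.pyGetD row (c+1) 0 := by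
  unfold pvRow3
  obtain ⟨k, rfl⟩ : ∃ k : ℕ, c = (k : Int) + 1 := ⟨(c - 1).toNat, by omega⟩
  have he : ((k : Int) + 1) - 1 = ((k : ℕ) : Int) := by ring
  rw [he, PySem.List.pyGetD_map_pyRange_one _ _ _ k _ (by omega)]
  ring_nf

theorem cell_eq (arr : List (List Int)) (r c : Int)
    (hr : r ∈ PySem.List.pyRange 1 ((arr.length : Int) - 1) 1)
    (hc : c ∈ PySem.List.pyRange 1 (((PySem.List.pyGetD arr r []).length : Int) - 1) 1)
    (hp : Pre_hourglassSum arr) :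
    ([(r-1, c-1), (r-1, c), (r-1, c+1), (r, c), (r+1, c-1), (r+1, c), (r+1, c+1)] :
        List (Int × Int)).foldl (fun s p =>
        s + PySem.List.pyGetD (PySem.List.pyGetD arr p.1 []) p.2 0) 0 =
      PySem.List.pyGetD (PySem.List.pyGetD (arr.map pvRow3) (r-1) []) (c-1) 0
        + PySem.List.pyGetD (PySem.List.pyGetD arr r []) c 0
        + PySem.List.pyGetD (PySem.List.pyGetD (arr.map pvRow3) (r+1) []) (c-1) 0 := by
  have hc' := (PySem.List.mem_pyRange_one).mp hc
  obtain ⟨hp1, hp2⟩ := hp r hr c hc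
  have hnil : pvRow3 ([] : List Int) = ([] : List Int) := by decide
  have hmap : ∀ i : Int, PySem.List.pyGetD (arr.map pvRow3) i [] = pvRow3 (PySem.List.pyGetD arr i []) := by
    intro i
    rw [← hnil, PySem.List.pyGetD_map, hnil]
  rw [hmap, hmap, pvRow3_get _ c hc'.1 hp1, pvRow3_get _ c hc'.1 hp2]
  simp [List.foldl]
  ring

-- ===== VERDICT (by name: the statement is the Claim_ definition above) =====
theorem hourglassSum_spec : Claim_equal_hourglassSum := by
  intro arr _ hp
  unfold Spec_hourglassSum hourglassSum hourglassSum_alt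
  apply PySem.List.foldl_congr_mem
  intro mx r hr
  apply PySem.List.foldl_congr_mem
  intro mx' c hc
  simp only
  rw [cell_eq arr r c hr hc hp]
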